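-- pv_equiv track=rewrite | github.com/Asrar-Ahammad/dsa-practice | 05_binary_search/BS_on_answers/02_nth_root.py | nth_root
-- ===== SOURCE A (Python) =====
-- def nth_root(n: int, m: int) -> int:
--     low = 1
--     high = m
--     ans = -1
--
--     while low <= high:
--         mid = (low + high) // 2
--
--         if n ** mid == m:
--             ans = mid
--             break
--         elif n ** mid < m:
--             low = mid + 1
--         else:
--             high = mid - 1
--
--     return ans
--
-- n = 3
--
-- m = 27
-- ===== SOURCE B (Python) =====
-- # Faster exact re-implementation: incremental multiplication instead of binary
-- # search with giant pows; guards for bases -1/0/1 keep the loop terminating.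
-- def nth_root(n: int, m: int) -> int:
--     if m < 1:
--         return -1
--     if n == 0:
--         return -1
--     if n == 1:
--         return 1 if m == 1 else -1
--     if n == -1:
--         return 2 if m == 1 else -1
--     p, x = n, 1
--     while p < m:
--         p *= n
--         x += 1
--     return x if p == m else -1
-- ===== Notes on version B (the rewrite author's own statement) =====
-- stated objective: faster
-- what changed: Replaces A's binary search over the exponent (O(log m) iterations, each computing a gigantic power n**mid with up to ~m*log n bits) by incremental multiplication p *= n counting steps until p >= m, with constant-time guards for bases -1, 0, 1.
-- outside the precondition, e.g. on nth_root(-3, 9): A returns -1, B returns 2; on nth_root(-1, 1): A returns -1, B returns 2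
import Mathlib
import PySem

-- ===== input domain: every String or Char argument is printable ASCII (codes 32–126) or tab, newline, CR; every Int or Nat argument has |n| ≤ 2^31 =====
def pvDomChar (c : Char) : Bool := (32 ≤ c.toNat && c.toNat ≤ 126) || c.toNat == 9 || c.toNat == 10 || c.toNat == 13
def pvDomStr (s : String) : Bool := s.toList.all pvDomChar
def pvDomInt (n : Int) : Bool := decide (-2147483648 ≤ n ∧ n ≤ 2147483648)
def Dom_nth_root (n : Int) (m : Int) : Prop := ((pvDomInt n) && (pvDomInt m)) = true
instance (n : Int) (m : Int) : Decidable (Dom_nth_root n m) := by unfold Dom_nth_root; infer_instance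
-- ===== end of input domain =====

-- B replaces A's binary search (with its huge n**mid powers) by incremental multiplication,
-- O(log_n m) small multiplications; return-value equivalence only.

-- ===== PORT A =====
-- while low <= high: mid = (low+high)//2; compare n**mid with m.
-- fuel = m.toNat+1 bounds the iterations (the interval [low,high] shrinks by ≥1 each turn,
-- initial length is m); proven sufficient in the lemmas below.  mid ≥ 1 throughout (low starts
-- at 1 and never decreases), so 'n ** mid' is exactly 'n ^ mid.toNat'.
def nthRootLoopA (n m : Int) : Nat → Int → Int → Int → Int
  | 0, _low, _high, ans => ans
  | fuel+1, low, high, ans =>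
    if low ≤ high then
      let mid := PySem.Int.floordiv (low + high) 2
      if n ^ mid.toNat = m then mid               -- ans = mid; break; return ans
      else if n ^ mid.toNat < m then nthRootLoopA n m fuel (mid+1) high ans
      else nthRootLoopA n m fuel low (mid-1) ans
    else ans

def nth_root (n : Int) (m : Int) : Int := nthRootLoopA n m (m.toNat + 1) 1 m (-1)

-- ===== PORT B =====
-- while p < m: p *= n; x += 1.  fuel = m.toNat+2 bounds the iterations (proven sufficient).
def nthRootLoopB (n m : Int) : Nat → Int → Int → Int
  | 0, p, x => if p = m then x else -1
  | fuel+1, p, x =>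
    if p < m then nthRootLoopB n m fuel (p * n) (x + 1)
    else if p = m then x else -1

def nth_root_alt (n : Int) (m : Int) : Int :=
  if m < 1 then -1
  else if n = 0 then -1
  else if n = 1 then (if m = 1 then 1 else -1)
  else if n = -1 then (if m = 1 then 2 else -1)
  else nthRootLoopB n m (m.toNat + 2) n 1

-- ===== PRECONDITION & SPEC =====
-- Pre_ excludes negative bases n with m ≥ 1 an even power of n: there A's binary search probes
-- the non-monotone sequence n**mid and returns an accidental value (-1 or the exponent,
-- depending on which midpoints it happens to visit), while B returns the exponent.
def Pre_nth_root (n : Int) (m : Int) : Prop :=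
  ¬ (n ≤ -1 ∧ 1 ≤ m ∧ ∃ j : Nat, j < 32 ∧ ((n * n) ^ (j + 1) : Int) = m)
instance (n : Int) (m : Int) : Decidable (Pre_nth_root n m) := by unfold Pre_nth_root; infer_instance
def pvWitness_nth_root : Int × Int := (3, 27)

def Spec_nth_root (n : Int) (m : Int) (out : Int) : Prop := out = nth_root_alt n m
instance (n : Int) (m : Int) (out : Int) : Decidable (Spec_nth_root n m out) := by unfold Spec_nth_root; infer_instance

-- ===== CLAIM (what is proved, stated in full; the proofs are below) =====
def Claim_equal_nth_root : Prop := ∀ (n : Int) (m : Int), Dom_nth_root n m → Pre_nth_root n m → Spec_nth_root n m (nth_root n m)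

-- ===== LEMMAS AND PROOFS =====

-- n ≥ 2 ⇒ t+1 ≤ n^t
lemma succ_le_pow_of_two_le (n : Int) (hn : 2 ≤ n) (t : Nat) : (t : Int) + 1 ≤ n ^ t := by
  induction t with
  | zero => simp
  | succ t ih =>
    have hp : (0:Int) < n ^ t := pow_pos (by omega) t
    have : n ^ (t+1) = n ^ t * n := by ring
    push_cast
    nlinarith

-- A's loop returns ans when no exponent in [low,high] works (any n).
lemma loopA_none (n m : Int) : ∀ (fuel : Nat) (low high ans : Int),
    (∀ k : Int, low ≤ k → k ≤ high → n ^ k.toNat ≠ m) →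
    nthRootLoopA n m fuel low high ans = ans := by
  intro fuel
  induction fuel with
  | zero => intro low high ans _; rfl
  | succ fuel ih =>
    intro low high ans hno
    simp only [nthRootLoopA]
    split
    · rename_i hle
      obtain ⟨h1, h2⟩ := PySem.Int.floordiv_two_mid_bounds hle
      have hne := hno _ h1 h2
      simp only [hne, if_false]
      split
      · exact ih _ _ _ (fun k hk1 hk2 => hno k (by omega) hk2)
      · exact ih _ _ _ (fun k hk1 hk2 => hno k hk1 (by omega))
    · rfl

-- A's loop finds the (unique) exponent y when n ≥ 2 and n^y = m, y ∈ [low,high], 1 ≤ low.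
lemma loopA_found (n m : Int) (hn : 2 ≤ n) : ∀ (fuel : Nat) (low high ans y : Int),
    1 ≤ low → low ≤ y → y ≤ high → n ^ y.toNat = m →
    (high - low + 1 : Int) ≤ fuel →
    nthRootLoopA n m fuel low high ans = y := by
  intro fuel
  induction fuel with
  | zero => intro low high ans y h1 h2 h3 _ hf; exfalso; simp at hf; omega
  | succ fuel ih =>
    intro low high ans y h1 h2 h3 hy hf
    have hle : low ≤ high := by omega
    simp only [nthRootLoopA, if_pos hle]
    obtain ⟨hm1, hm2⟩ := PySem.Int.floordiv_two_mid_bounds hle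
    set mid := PySem.Int.floordiv (low + high) 2 with hmid
    have hmono : ∀ a b : Int, 1 ≤ a → a < b → n ^ a.toNat < n ^ b.toNat := by
      intro a b ha hab
      exact pow_lt_pow_right₀ (by omega) (by omega)
    by_cases he : n ^ mid.toNat = m
    · simp only [he, if_true]
      by_contra hne
      rcases lt_or_gt_of_ne (fun h : mid = y => hne h) with h | h
      · have := hmono mid y (by omega) h; omega
      · have := hmono y mid (by omega) h; omega
    · simp only [he, if_false]
      by_cases hlt : n ^ mid.toNat < m
      · simp only [hlt, if_true]
        have hmy : mid < y := by
          by_contra hc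
          have : y ≤ mid := by omega
          rcases eq_or_lt_of_le this with h | h
          · exact he (h ▸ hy)
          · have := hmono y mid (by omega) h; omega
        exact ih _ _ _ _ (by omega) (by omega) h3 hy (by push_cast at hf ⊢; omega)
      · simp only [hlt, if_false]
        have hmy : y < mid := by
          by_contra hc
          have : mid ≤ y := by omega
          rcases eq_or_lt_of_le this with h | h
          · exact he (by rw [h]; exact hy)
          · have := hmono mid y (by omega) h; omega
        exact ih _ _ _ _ h1 h2 (by omega) hy (by push_cast at hf ⊢; omega)

-- B's loop returns -1 when no exponent ≥ 1 works (any n, any fuel).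
lemma loopB_none (n m : Int) (hno : ∀ y : Int, 1 ≤ y → n ^ y.toNat ≠ m) :
    ∀ (fuel : Nat) (p x : Int), 1 ≤ x → p = n ^ x.toNat →
    nthRootLoopB n m fuel p x = -1 := by
  intro fuel
  induction fuel with
  | zero =>
    intro p x hx hp
    simp only [nthRootLoopB]
    rw [if_neg (hp ▸ hno x hx)]
  | succ fuel ih =>
    intro p x hx hp
    simp only [nthRootLoopB]
    split
    · refine ih _ _ (by omega) ?_
      have : (x + 1).toNat = x.toNat + 1 := by omega
      rw [this, pow_succ, hp]
    · rw [if_neg (hp ▸ hno x hx)]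

-- B's loop finds y when n ≥ 2, n^y = m, x ≤ y, p = n^x and fuel ≥ y - x.
lemma loopB_found (n m : Int) (hn : 2 ≤ n) : ∀ (fuel : Nat) (p x y : Int),
    1 ≤ x → x ≤ y → p = n ^ x.toNat → n ^ y.toNat = m →
    (y - x : Int) ≤ fuel →
    nthRootLoopB n m fuel p x = y := by
  intro fuel
  induction fuel with
  | zero =>
    intro p x y hx hxy hp hy hf
    have hxe : x = y := by simp at hf; omega
    simp only [nthRootLoopB]
    rw [if_pos (by rw [hp, hxe, hy]), hxe]
  | succ fuel ih =>
    intro p x y hx hxy hp hy hf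
    have hmono : ∀ a b : Int, 1 ≤ a → a < b → n ^ a.toNat < n ^ b.toNat := by
      intro a b ha hab
      exact pow_lt_pow_right₀ (by omega) (by omega)
    simp only [nthRootLoopB]
    by_cases hlt : p < m
    · rw [if_pos hlt]
      have hxy' : x < y := by
        by_contra hc
        have : x = y := by omega
        rw [this, hy] at hp; omega
      refine ih _ _ _ (by omega) (by omega) ?_ hy (by push_cast at hf ⊢; omega)
      have : (x + 1).toNat = x.toNat + 1 := by omega
      rw [this, pow_succ, hp]
    · rw [if_neg hlt]
      have hpe : p = m := by
        rcases eq_or_lt_of_le hxy with h | h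
        · rw [hp, h, hy]
        · exfalso
          have h2 := hmono x y hx h
          rw [← hp] at h2
          omega
      rw [if_pos hpe]
      rcases eq_or_lt_of_le hxy with h | h
      · exact h
      · exfalso
        have h2 := hmono x y hx h
        rw [← hp] at h2
        omega

-- On Dom ∩ Pre_, a base n ≤ -2 admits no exponent at all (an even power would violate Pre_,
-- given m ≤ 2^31 from Dom; an odd power is negative).
lemma no_sol_neg (n m : Int) (hn : n ≤ -2) (hm : 1 ≤ m) (hmB : m ≤ 2147483648)
    (hpre : Pre_nth_root n m) : ∀ y : Int, 1 ≤ y → n ^ y.toNat ≠ m := by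
  intro y hy he
  set t := y.toNat with ht
  have ht1 : 1 ≤ t := by omega
  rcases Nat.even_or_odd t with hpar | hpar
  · obtain ⟨j, hj⟩ := hpar
    have hj1 : 1 ≤ j := by omega
    have hsq : ((n * n) ^ j : Int) = m := by
      rw [← he, hj, pow_add, ← mul_pow]
    have h4 : (4 : Int) ≤ n * n := by nlinarith
    have hjle : j ≤ 15 := by
      by_contra hc
      have h16 : 16 ≤ j := by omega
      have : (4 : Int) ^ j ≤ (n * n) ^ j :=
        pow_le_pow_left₀ (by norm_num) h4 j
      have h4big : (4 : Int) ^ 16 ≤ 4 ^ j :=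
        pow_le_pow_right₀ (by norm_num) h16
      have : (4:Int)^16 = 4294967296 := by norm_num
      omega
    exact hpre ⟨by omega, hm, j - 1, by omega, by
      have : j - 1 + 1 = j := by omega
      rw [this, hsq]⟩
  · have : n ^ t < 0 := hpar.pow_neg (by omega)
    omega

-- every solution exponent is ≤ m when n ≥ 2
lemma sol_le (n m y : Int) (hn : 2 ≤ n) (hy : 1 ≤ y) (he : n ^ y.toNat = m) : y ≤ m := by
  have := succ_le_pow_of_two_le n hn y.toNat
  omega

-- ===== VERDICT (by name: the statement is the Claim_ definition above) =====
theorem nth_root_spec : Claim_equal_nth_root := by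
  intro n m hdom hpre
  unfold Spec_nth_root nth_root nth_root_alt
  have hmB : m ≤ 2147483648 := by
    unfold Dom_nth_root pvDomInt at hdom
    simp [decide_eq_true_eq] at hdom
    omega
  by_cases hm : m < 1
  · rw [if_pos hm]
    exact loopA_none n m _ _ _ _ (fun k hk1 hk2 => by omega)
  · rw [if_neg hm]
    push_neg at hm
    have hmt : (m.toNat : Int) = m := by omega
    by_cases hn0 : n = 0
    · subst hn0
      rw [if_pos rfl]
      refine loopA_none 0 m _ _ _ _ (fun k hk1 hk2 => ?_)
      rw [zero_pow (by omega : k.toNat ≠ 0)]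
      omega
    · rw [if_neg hn0]
      by_cases hn1 : n = 1
      · subst hn1
        rw [if_pos rfl]
        by_cases hm1 : m = 1
        · subst hm1; rw [if_pos rfl]; decide
        · rw [if_neg hm1]
          refine loopA_none 1 m _ _ _ _ (fun k hk1 hk2 => ?_)
          rw [one_pow]
          omega
      · rw [if_neg hn1]
        by_cases hnm1 : n = -1
        · subst hnm1
          rw [if_pos rfl]
          have hm1 : m ≠ 1 := fun h => hpre ⟨by omega, hm, 0, by omega, by norm_num [h]⟩
          rw [if_neg hm1]
          refine loopA_none (-1) m _ _ _ _ (fun k hk1 hk2 => ?_)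
          intro he
          have habs : |(-1:Int) ^ k.toNat| = 1 := by
            rw [abs_pow]; norm_num
          rw [he] at habs
          rcases (abs_eq (by norm_num : (0:Int) ≤ 1)).mp habs with h | h <;> omega
        · rw [if_neg hnm1]
          by_cases hn2 : 2 ≤ n
          · -- positive base ≥ 2
            by_cases hex : ∃ y : Int, 1 ≤ y ∧ n ^ y.toNat = m
            · obtain ⟨y, hy1, hye⟩ := hex
              have hym : y ≤ m := sol_le n m y hn2 hy1 hye
              rw [loopA_found n m hn2 _ 1 m (-1) y (le_refl 1) hy1 hym hye (by omega)]
              rw [loopB_found n m hn2 _ n 1 y (le_refl 1) hy1 (by norm_num) hye (by omega)]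
            · push_neg at hex
              rw [loopA_none n m _ _ _ _ (fun k hk1 _ => hex k hk1)]
              rw [loopB_none n m (fun y hy => hex y hy) _ n 1 (le_refl 1) (by norm_num)]
          · -- negative base ≤ -2
            have hnle : n ≤ -2 := by omega
            have hno := no_sol_neg n m hnle hm hmB hpre
            rw [loopA_none n m _ _ _ _ (fun k hk1 _ => hno k hk1)]
            rw [loopB_none n m hno _ n 1 (le_refl 1) (by norm_num)]
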